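-- pv_equiv track=rewrite | github.com/bimors11/OmniLink | telemetry/router_widget.py | _build_output_lines
-- ===== SOURCE A (Python) =====
-- from typing import List, Optional
--
-- def _build_output_lines(targets: List[tuple[str, int]]) -> List[str]:
--     lines: List[str] = []
--     seen = set()
--     i = 1
--     for ip, port in targets:
--         key = (ip, port)
--         if key in seen:
--             continue
--         seen.add(key)
--         lines += [f"[UdpEndpoint gcs{i}]", "Mode=Normal", f"Address={ip}", f"Port={port}", ""]
--         i += 1
--     return lines
-- ===== SOURCE B (Python) =====
-- from typing import List
--
-- def _build_output_lines(targets: List[tuple[str, int]]) -> List[str]: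
--     # Recursive, filter-based: emit the head's block, then recurse on the tail
--     # with every later copy of the head removed. No seen-set, no counter state.
--     def go(rest, i):
--         if not rest:
--             return []
--         ip, port = rest[0]
--         tail = [t for t in rest[1:] if t != (ip, port)]
--         return [f"[UdpEndpoint gcs{i}]", "Mode=Normal",
--                 f"Address={ip}", f"Port={port}", ""] + go(tail, i + 1)
--     return go(targets, 1)
-- ===== Notes on version B (the rewrite author's own statement) =====
-- stated objective: alternative
-- what changed: Replaces A's single accumulator loop with a seen-set and manual counter by a recursive filter-based scheme: emit the head's five-line block, filter all later duplicates of the head out of the tail, recurse; dedup is done by list filtering, no auxiliary set at all.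
import Mathlib
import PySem

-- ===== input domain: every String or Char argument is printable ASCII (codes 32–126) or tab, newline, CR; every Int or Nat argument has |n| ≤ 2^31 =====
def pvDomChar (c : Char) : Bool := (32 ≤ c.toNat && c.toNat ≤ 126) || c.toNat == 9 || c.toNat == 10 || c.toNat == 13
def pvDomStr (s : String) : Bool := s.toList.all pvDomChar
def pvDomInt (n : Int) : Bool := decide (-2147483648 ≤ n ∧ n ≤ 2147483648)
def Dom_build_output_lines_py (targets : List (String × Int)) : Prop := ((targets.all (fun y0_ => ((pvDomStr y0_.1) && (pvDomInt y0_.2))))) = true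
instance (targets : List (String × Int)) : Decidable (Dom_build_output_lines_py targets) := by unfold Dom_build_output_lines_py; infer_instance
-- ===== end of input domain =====

-- B replaces A's single seen-set/counter loop by a recursive filter-based scheme
-- (emit the head's block, filter later duplicates of the head out of the tail, recurse).

-- ===== PORT A =====
-- the five-line block appended for one endpoint (the text of the Pythons' f-strings)
def pvBlock (i : Int) (p : String × Int) : List String :=
  ["[UdpEndpoint gcs" ++ PySem.Int.toStr i ++ "]", "Mode=Normal",
   "Address=" ++ p.1, "Port=" ++ PySem.Int.toStr p.2, ""]

def build_output_lines_py (targets : List (String × Int)) : List String :=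
  (targets.foldl
    (fun (st : List String × PySem.Set (String × Int) × Int) p =>
      let (lines, seen, i) := st
      if PySem.Set.contains seen p then st
      else (lines ++ pvBlock i p, PySem.Set.add seen p, i + 1))
    ([], PySem.Set.empty, 1)).1

-- ===== PORT B =====
-- helper go(rest, i) of Source B: head's block ++ recursion on the duplicate-free tail
def pvGo : List (String × Int) → Int → List String
  | [], _ => []
  | p :: rest, i =>
      pvBlock i p ++ pvGo (rest.filter (fun t => t ≠ p)) (i + 1)
termination_by ts _ => ts.length
decreasing_by simpa using Nat.lt_succ_of_le ((List.length_filter_le _ _).trans (by simp))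

def build_output_lines_py_alt (targets : List (String × Int)) : List String :=
  pvGo targets 1

-- ===== PRECONDITION & SPEC =====
def Spec_build_output_lines_py (targets : List (String × Int)) (out : List String) : Prop := out = build_output_lines_py_alt targets
instance (targets : List (String × Int)) (out : List String) : Decidable (Spec_build_output_lines_py targets out) := by unfold Spec_build_output_lines_py; infer_instance

-- ===== CLAIM (what is proved, stated in full; the proofs are below) =====
def Claim_equal_build_output_lines_py : Prop := ∀ (targets : List (String × Int)), Dom_build_output_lines_py targets → Spec_build_output_lines_py targets (build_output_lines_py targets)

-- ===== LEMMAS AND PROOFS =====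

-- the elements of ts that are new w.r.t. seen, in order of first occurrence
def pvNew (seen : PySem.Set (String × Int)) : List (String × Int) → List (String × Int)
  | [] => []
  | p :: ts =>
    if PySem.Set.contains seen p then pvNew seen ts
    else p :: pvNew (PySem.Set.add seen p) ts

-- A's fold produces the enumerated blocks of the first-occurrence-new elements
theorem pvFold_invariant (ts : List (String × Int)) (lines : List String)
    (seen : PySem.Set (String × Int)) (i : Int) :
    (ts.foldl
      (fun (st : List String × PySem.Set (String × Int) × Int) p =>
        let (lines, seen, i) := st
        if PySem.Set.contains seen p then st
        else (lines ++ pvBlock i p, PySem.Set.add seen p, i + 1))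
      (lines, seen, i)).1
    = lines ++ (PySem.List.enumerate (pvNew seen ts) i).flatMap (fun ip => pvBlock ip.1 ip.2) := by
  induction ts generalizing lines seen i with
  | nil => simp [pvNew]
  | cons p ts ih =>
    by_cases h : PySem.Set.contains seen p
    · simp only [List.foldl_cons, h, if_true]
      rw [ih]
      simp only [pvNew, h, if_true]
    · have h' : PySem.Set.contains seen p = false := Bool.eq_false_iff.mpr h
      simp only [List.foldl_cons, h', Bool.false_eq_true, if_false]
      rw [ih]
      simp only [pvNew, h', Bool.false_eq_true, if_false, PySem.List.enumerate_cons,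
        List.flatMap_cons, List.append_assoc]

-- B's recursion equals the enumerated blocks of pvNew seen ts, where the filtering done so
-- far is recorded as the set of heads already removed.
theorem pvGo_eq_new (ts : List (String × Int)) (seen : PySem.Set (String × Int)) (i : Int) :
    pvGo (ts.filter (fun t => !(PySem.Set.contains seen t))) i
    = (PySem.List.enumerate (pvNew seen ts) i).flatMap (fun ip => pvBlock ip.1 ip.2) := by
  induction ts generalizing seen i with
  | nil => simp only [List.filter_nil, pvNew]; rw [pvGo.eq_def]; simp
  | cons p ts ih =>
    by_cases h : PySem.Set.contains seen p
    · simp only [List.filter_cons, h, Bool.not_true, Bool.false_eq_true, if_false, pvNew, if_true]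
      exact ih seen i
    · have h' : PySem.Set.contains seen p = false := Bool.eq_false_iff.mpr h
      have hadd : PySem.Set.add seen p = seen ++ [p] := by
        simp only [PySem.Set.add, h', Bool.false_eq_true, if_false]
      have hfilter :
          (ts.filter (fun t => !(PySem.Set.contains seen t))).filter (fun t => t ≠ p)
          = ts.filter (fun t => !(PySem.Set.contains (PySem.Set.add seen p) t)) := by
        rw [List.filter_filter]
        apply List.filter_congr
        intro t _
        simp [hadd, PySem.Set.contains, eq_comm, Bool.and_comm]
      simp only [List.filter_cons, h', Bool.not_false, if_true, pvNew, Bool.false_eq_true,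
        if_false, PySem.List.enumerate_cons, List.flatMap_cons]
      rw [pvGo, hfilter, ih (PySem.Set.add seen p) (i + 1)]

-- ===== VERDICT (by name: the statement is the Claim_ definition above) =====
theorem build_output_lines_py_spec : Claim_equal_build_output_lines_py := by
  intro targets _
  show build_output_lines_py targets = build_output_lines_py_alt targets
  have hA := pvFold_invariant targets [] PySem.Set.empty 1
  have hB := pvGo_eq_new targets PySem.Set.empty 1
  have hfilt : targets.filter (fun t => !(PySem.Set.contains PySem.Set.empty t)) = targets := by
    simp [PySem.Set.empty, PySem.Set.contains]
  rw [hfilt] at hB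
  simpa [build_output_lines_py, build_output_lines_py_alt, hB] using hA
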